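-- pv_equiv track=rewrite | github.com/Burla-Cloud/burla | main_service/src/main_service/endpoints/cluster_lifecycle.py | _pack_n4_standard_machines_up_to
-- ===== SOURCE A (Python) =====
-- N4_STANDARD_SIZES_DESCENDING = (80, 64, 32, 16, 8, 4, 2)
--
-- def _pack_n4_standard_machines_up_to(num_cpus: int, min_size: int = 2) -> list[str]:
--     machines = []
--     remaining = num_cpus
--     for size in [size for size in N4_STANDARD_SIZES_DESCENDING if size >= min_size]:
--         while remaining >= size:
--             machines.append(f"n4-standard-{size}")
--             remaining -= size
--     return machines
-- ===== SOURCE B (Python) =====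
-- N4_STANDARD_SIZES_DESCENDING = (80, 64, 32, 16, 8, 4, 2)
--
-- def _pack_n4_standard_machines_up_to(num_cpus: int, min_size: int = 2) -> list[str]:
--     machines = []
--     remaining = max(num_cpus, 0)
--     for size in N4_STANDARD_SIZES_DESCENDING:
--         if size >= min_size:
--             count, remaining = divmod(remaining, size)
--             machines.extend([f"n4-standard-{size}"] * count)
--     return machines
-- ===== Notes on version B (the rewrite author's own statement) =====
-- stated objective: simpler
-- what changed: Replaces the inner while-subtraction loop with one divmod per eligible size, extending the result with count copies of the machine name.
import Mathlib
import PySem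

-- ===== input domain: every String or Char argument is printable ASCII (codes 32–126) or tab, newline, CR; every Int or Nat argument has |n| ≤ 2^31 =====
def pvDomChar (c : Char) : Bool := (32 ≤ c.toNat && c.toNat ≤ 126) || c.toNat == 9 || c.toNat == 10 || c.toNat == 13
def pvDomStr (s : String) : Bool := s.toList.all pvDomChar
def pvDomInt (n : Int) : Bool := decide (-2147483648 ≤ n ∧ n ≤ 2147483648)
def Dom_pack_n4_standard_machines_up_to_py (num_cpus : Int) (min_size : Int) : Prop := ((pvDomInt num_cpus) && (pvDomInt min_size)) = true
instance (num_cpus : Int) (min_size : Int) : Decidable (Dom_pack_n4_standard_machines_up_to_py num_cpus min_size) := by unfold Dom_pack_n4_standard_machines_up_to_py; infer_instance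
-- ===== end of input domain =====

-- B replaces A's inner while-subtraction loop with one divmod per eligible size (simpler, same values).

-- f"n4-standard-{size}"
def pvN4Name (size : Int) : String := String.ofList ("n4-standard-".toList ++ PySem.Int.toChars size)

def pvSizesDescending : List Int := [80, 64, 32, 16, 8, 4, 2]

-- ===== PORT A =====
-- inner 'while remaining >= size: machines.append(...); remaining -= size'
-- (the '2 ≤ size' conjunct only makes the recursion terminating; every size A passes is ≥ 2)
def pvWhileA (size : Int) (st : List String × Int) : List String × Int :=
  if _h : 2 ≤ size ∧ size ≤ st.2 then
    pvWhileA size (st.1 ++ [pvN4Name size], st.2 - size)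
  else st
termination_by st.2.toNat
decreasing_by omega

def pack_n4_standard_machines_up_to_py (num_cpus : Int) (min_size : Int) : List String :=
  let sizes := pvSizesDescending.filter (fun size => decide (min_size ≤ size))
  (sizes.foldl (fun st size => pvWhileA size st) ([], num_cpus)).1

-- ===== PORT B =====
def pack_n4_standard_machines_up_to_py_alt (num_cpus : Int) (min_size : Int) : List String :=
  (pvSizesDescending.foldl
    (fun (st : List String × Int) size =>
      if min_size ≤ size then
        let count := PySem.Int.floordiv st.2 size
        let rem := PySem.Int.mod st.2 size
        (st.1 ++ List.replicate count.toNat (pvN4Name size), rem)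
      else st)
    ([], max num_cpus 0)).1

-- ===== PRECONDITION & SPEC =====
def Spec_pack_n4_standard_machines_up_to_py (num_cpus : Int) (min_size : Int) (out : List String) : Prop := out = pack_n4_standard_machines_up_to_py_alt num_cpus min_size
instance (num_cpus : Int) (min_size : Int) (out : List String) : Decidable (Spec_pack_n4_standard_machines_up_to_py num_cpus min_size out) := by unfold Spec_pack_n4_standard_machines_up_to_py; infer_instance

-- ===== CLAIM (what is proved, stated in full; the proofs are below) =====
def Claim_equal_pack_n4_standard_machines_up_to_py : Prop := ∀ (num_cpus : Int) (min_size : Int), Dom_pack_n4_standard_machines_up_to_py num_cpus min_size → Spec_pack_n4_standard_machines_up_to_py num_cpus min_size (pack_n4_standard_machines_up_to_py num_cpus min_size)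

-- ===== LEMMAS AND PROOFS =====

-- A's inner while loop never fires when the guard fails.
theorem pvWhileA_stuck (size r : Int) (acc : List String) (hr : ¬ (2 ≤ size ∧ size ≤ r)) :
    pvWhileA size (acc, r) = (acc, r) := by
  rw [pvWhileA, dif_neg]
  exact hr

-- A's inner while loop, on a nonnegative remaining, appends ⌊r/size⌋ names and leaves r % size.
theorem pvWhileA_eq (size : Int) (hs : 2 ≤ size) :
    ∀ (n : Nat) (r : Int), 0 ≤ r → r.toNat ≤ n → ∀ (acc : List String),
      pvWhileA size (acc, r) =
        (acc ++ List.replicate (PySem.Int.floordiv r size).toNat (pvN4Name size),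
         PySem.Int.mod r size) := by
  intro n
  induction n with
  | zero =>
    intro r hr hn acc
    have hr0 : r = 0 := by omega
    subst hr0
    rw [pvWhileA_stuck size 0 acc (by omega)]
    rw [PySem.Int.floordiv_eq_ediv_of_pos (by omega), PySem.Int.mod_eq_emod_of_pos (by omega)]
    simp
  | succ n ih =>
    intro r hr hn acc
    rw [PySem.Int.floordiv_eq_ediv_of_pos (by omega), PySem.Int.mod_eq_emod_of_pos (by omega)]
    by_cases hcase : size ≤ r
    · rw [pvWhileA, dif_pos ⟨hs, hcase⟩]
      have hrec := ih (r - size) (by omega) (by omega) (acc ++ [pvN4Name size])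
      rw [PySem.Int.floordiv_eq_ediv_of_pos (by omega),
          PySem.Int.mod_eq_emod_of_pos (by omega)] at hrec
      rw [hrec]
      have hdiv : (r - size) / size = r / size - 1 := by
        have h := Int.add_mul_ediv_right r (-1) (by omega : size ≠ 0)
        rw [show r + -1 * size = r - size by ring] at h
        omega
      have hmod : (r - size) % size = r % size := Int.sub_emod_right r size
      have hpos : 1 ≤ r / size := by
        rw [Int.le_ediv_iff_mul_le (by omega : (0:Int) < size)]
        omega
      have hdivnn : 0 ≤ (r - size) / size := Int.ediv_nonneg (by omega) (by omega)
      have htn : (r / size).toNat = ((r - size) / size).toNat + 1 := by omega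
      rw [hmod, htn, List.replicate_succ]
      simp
    · rw [pvWhileA_stuck size r acc (by omega)]
      have hdiv : r / size = 0 := Int.ediv_eq_zero_of_lt hr (by omega)
      have hmod : r % size = r := Int.emod_eq_of_lt hr (by omega)
      rw [hdiv, hmod]
      simp

-- Fold invariant: B's fold state is A's fold state with the remainder clamped at 0.
theorem pvFold_eq (min_size : Int) :
    ∀ (sizes : List Int), (∀ s ∈ sizes, 2 ≤ s) → ∀ (acc : List String) (r : Int),
      sizes.foldl
        (fun (st : List String × Int) size =>
          if min_size ≤ size then
            (st.1 ++ List.replicate (PySem.Int.floordiv st.2 size).toNat (pvN4Name size),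
             PySem.Int.mod st.2 size)
          else st)
        (acc, max r 0) =
      ((sizes.foldl (fun st size => if min_size ≤ size then pvWhileA size st else st) (acc, r)).1,
       max (sizes.foldl (fun st size => if min_size ≤ size then pvWhileA size st else st) (acc, r)).2 0) := by
  intro sizes
  induction sizes with
  | nil => intro _ acc r; rfl
  | cons s rest ih =>
    intro hall acc r
    have hs : 2 ≤ s := hall s (by simp)
    simp only [List.foldl_cons]
    by_cases hmin : min_size ≤ s
    · rw [if_pos hmin, if_pos hmin]
      by_cases hr : 0 ≤ r
      · have hmax : max r 0 = r := by omega
        rw [hmax, pvWhileA_eq s hs r.toNat r hr (le_refl _) acc]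
        have hmnn : 0 ≤ PySem.Int.mod r s := PySem.Int.mod_nonneg r (by omega)
        have hmax2 : max (PySem.Int.mod r s) 0 = PySem.Int.mod r s := by omega
        have H := ih (fun x hx => hall x (by simp [hx]))
          (acc ++ List.replicate (PySem.Int.floordiv r s).toNat (pvN4Name s)) (PySem.Int.mod r s)
        rw [hmax2] at H
        exact H
      · have hmax : max r 0 = 0 := by omega
        rw [hmax, pvWhileA_stuck s r acc (by omega)]
        have h0 : PySem.Int.floordiv 0 s = 0 := by
          rw [PySem.Int.floordiv_eq_ediv_of_pos (by omega)]; simp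
        have h0m : PySem.Int.mod 0 s = 0 := by
          rw [PySem.Int.mod_eq_emod_of_pos (by omega)]; simp
        rw [h0, h0m]
        simp only [Int.toNat_zero, List.replicate_zero, List.append_nil]
        have := ih (fun x hx => hall x (by simp [hx])) acc r
        rw [hmax] at this
        exact this
    · rw [if_neg hmin, if_neg hmin]
      exact ih (fun x hx => hall x (by simp [hx])) acc r

-- ===== VERDICT (by name: the statement is the Claim_ definition above) =====
theorem pack_n4_standard_machines_up_to_py_spec : Claim_equal_pack_n4_standard_machines_up_to_py := by
  intro num_cpus min_size _
  show ((pvSizesDescending.filter (fun size => decide (min_size ≤ size))).foldl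
          (fun st size => pvWhileA size st) ([], num_cpus)).1
      = (pvSizesDescending.foldl
          (fun (st : List String × Int) size =>
            if min_size ≤ size then
              (st.1 ++ List.replicate (PySem.Int.floordiv st.2 size).toNat (pvN4Name size),
               PySem.Int.mod st.2 size)
            else st)
          ([], max num_cpus 0)).1
  rw [List.foldl_filter]
  simp only [decide_eq_true_eq]
  have h := pvFold_eq min_size pvSizesDescending (by decide) [] num_cpus
  rw [h]
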